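-- pv_equiv track=rewrite | github.com/BOLTB0X/DataStructure_Argolithm | BOJ/자료구조/Queue/2164/2164.py | solution
-- ===== SOURCE A (Python) =====
-- from collections import deque
--
-- def solution(n):
--     cards = deque()
--
--     for i in range(1, n+1):
--         cards.append(i)
--
--     while len(cards) > 1:
--         cards.popleft()
--         cards.append(cards.popleft())
--
--     return cards.popleft()
-- ===== SOURCE B (Python) =====
-- def solution(n):
--     # O(log n) closed form: let p be the largest power of two <= n;
--     # survivor is n if n == p else 2*(n - p).
--     p = 1
--     while p * 2 <= n:
--         p *= 2
--     return n if p == n else 2 * (n - p)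
-- ===== Notes on version B (the rewrite author's own statement) =====
-- stated objective: faster
-- what changed: Replaced the O(n) deque simulation of the discard/move card game with the closed-form Josephus(k=2) answer: find the largest power of two p <= n by doubling and return n if n == p else 2*(n - p).
import Mathlib
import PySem

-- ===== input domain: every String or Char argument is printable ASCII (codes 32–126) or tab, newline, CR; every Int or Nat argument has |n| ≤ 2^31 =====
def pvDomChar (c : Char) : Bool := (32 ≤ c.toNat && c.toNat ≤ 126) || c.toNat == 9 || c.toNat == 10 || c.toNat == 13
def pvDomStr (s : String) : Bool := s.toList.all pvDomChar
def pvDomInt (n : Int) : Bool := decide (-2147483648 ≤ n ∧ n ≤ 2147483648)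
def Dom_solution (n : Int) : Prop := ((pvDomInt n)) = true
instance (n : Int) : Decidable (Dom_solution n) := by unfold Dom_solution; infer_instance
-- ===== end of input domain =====

-- B replaces A's O(n) deque simulation by the O(log n) closed-form Josephus(k=2) answer.

-- ===== PORT A =====
-- the deque is ported as the standard two-list deque (front, back): append pushes on back,
-- popleft takes from front, reversing back into front when front runs dry.
-- the while-loop: pop the front card, move the next front card to the back.
def loopA (f b : List Int) : List Int :=
  match f with
  | _ :: y :: f' => loopA f' (y :: b)
  | [x] =>
    match hb : b.reverse with
    | [] => [x]
    | y :: f' => loopA f' [y]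
  | [] =>
    match hb : b.reverse with
    | [] => []
    | [x] => [x]
    | _ :: y :: f' => loopA f' [y]
termination_by f.length + b.length
decreasing_by
  · simp; omega
  · have := congrArg List.length hb; simp at this; simp; omega
  · have := congrArg List.length hb; simp at this; simp; omega

-- final 'cards.popleft()' raises IndexError on the empty deque (n ≤ 0): those inputs
-- are excluded by Pre_solution; headD's default is never reached inside Pre_.
def solution (n : Int) : Int :=
  (loopA (PySem.List.pyRange 1 (n + 1) 1) []).headD 0

-- ===== PORT B =====
-- 'while p * 2 <= n: p *= 2'; the '1 ≤ p' guard only makes the recursion total (p starts at 1)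
def findPow (n p : Int) : Int :=
  if h : 1 ≤ p ∧ 2 * p ≤ n then findPow n (2 * p) else p
termination_by (n - p).toNat
decreasing_by omega

def solution_alt (n : Int) : Int :=
  let p := findPow n 1
  if p = n then n else 2 * (n - p)

-- ===== PRECONDITION & SPEC =====
-- Pre_ excludes n ≤ 0, on which A's final popleft() raises IndexError on the empty deque.
def Pre_solution (n : Int) : Prop := 1 ≤ n
instance (n : Int) : Decidable (Pre_solution n) := by unfold Pre_solution; infer_instance
def pvWitness_solution : Int := (6)

def Spec_solution (n : Int) (out : Int) : Prop := out = solution_alt n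
instance (n : Int) (out : Int) : Decidable (Spec_solution n out) := by unfold Spec_solution; infer_instance

-- ===== CLAIM (what is proved, stated in full; the proofs are below) =====
def Claim_equal_solution : Prop := ∀ (n : Int), Dom_solution n → Pre_solution n → Spec_solution n (solution n)

-- ===== LEMMAS AND PROOFS =====

-- the loop seen on the single abstract list (front ++ back.reverse)
def rot (l : List Int) : List Int :=
  match l with
  | _ :: b :: rest => rot (rest ++ [b])
  | l => l
termination_by l.length
decreasing_by simp

lemma loopA_eq_rot_fuel : ∀ (N : Nat) (f b : List Int), f.length + b.length ≤ N →
    loopA f b = rot (f ++ b.reverse) := by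
  intro N
  induction N with
  | zero =>
    intro f b h
    match f, b with
    | [], [] => simp [loopA, rot]
    | x :: _, _ => simp at h
    | [], x :: _ => simp at h
  | succ N ih =>
    intro f b h
    match f with
    | x :: y :: f' =>
      rw [show loopA (x :: y :: f') b = loopA f' (y :: b) from by rw [loopA]]
      rw [ih f' (y :: b) (by simp at h ⊢; omega)]
      have : rot ((x :: y :: f') ++ b.reverse) = rot ((f' ++ b.reverse) ++ [y]) := by
        rw [show (x :: y :: f') ++ b.reverse = x :: y :: (f' ++ b.reverse) from rfl]
        rw [rot]
      rw [this]
      congr 1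
      simp
    | [x] =>
      rw [loopA]
      split
      · next heq => rw [heq]; simp [rot]
      · next y f' heq =>
        have hbl := congrArg List.length heq
        simp at hbl
        rw [ih f' [y] (by simp at h ⊢; omega)]
        rw [heq]
        conv_rhs => rw [show [x] ++ (y :: f') = x :: y :: f' from rfl, rot]
        simp
    | [] =>
      rw [loopA]
      split
      · next heq => rw [heq]; simp [rot]
      · next z heq => rw [heq]; simp [rot]
      · next z y f' heq =>
        have hbl := congrArg List.length heq
        simp at hbl
        rw [ih f' [y] (by simp at h ⊢; omega)]
        rw [heq]
        conv_rhs => rw [show ([] : List Int) ++ (z :: y :: f') = z :: y :: f' from rfl, rot]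
        simp

lemma loopA_eq_rot (l : List Int) : loopA l [] = rot l := by
  rw [loopA_eq_rot_fuel (l.length + 0) l [] (le_refl _)]
  simp

-- index of the surviving card in a list of length m
def pos : Nat → Nat
  | 0 => 0
  | 1 => 0
  | (m + 2) => if pos (m + 1) = m then 1 else pos (m + 1) + 2

lemma pos_lt : ∀ m : Nat, 1 ≤ m → pos m < m := by
  intro m
  induction m with
  | zero => omega
  | succ k ih =>
    intro _
    match k, ih with
    | 0, _ => simp [pos]
    | (j + 1), ih =>
      have h := ih (by omega)
      simp only [pos]
      split <;> omega

lemma rot_eq_pos_fuel : ∀ (N : Nat) (l : List Int), l.length ≤ N → l ≠ [] →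
    rot l = [l.getD (pos l.length) 0] := by
  intro N
  induction N with
  | zero => intro l h hne; cases l <;> simp_all
  | succ N ih =>
    intro l hlN hne
    match l with
    | [a] => simp [rot, pos]
    | a :: b :: rest =>
      have ihr := ih (rest ++ [b]) (by simp at hlN ⊢; omega) (by simp)
      have hlen2 : (rest ++ [b]).length = rest.length + 1 := by simp
      have hL : (a :: b :: rest).length = rest.length + 2 := by simp
      rw [show rot (a :: b :: rest) = rot (rest ++ [b]) from by rw [rot], ihr, hlen2, hL]
      have hq : pos (rest.length + 1) < rest.length + 1 := pos_lt _ (by omega)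
      have hpos2 : pos (rest.length + 2)
          = if pos (rest.length + 1) = rest.length then 1 else pos (rest.length + 1) + 2 := by
        rw [pos]
      by_cases hc : pos (rest.length + 1) = rest.length
      · rw [hpos2, if_pos hc, hc]
        have h1 : (rest ++ [b]).getD rest.length 0 = b := by
          rw [List.getD_eq_getElem?_getD, List.getElem?_append_right (le_refl _)]
          simp
        rw [h1]
        simp [List.getD]
      · have hql : pos (rest.length + 1) < rest.length := by omega
        rw [hpos2, if_neg hc]
        have h1 : (rest ++ [b]).getD (pos (rest.length + 1)) 0
            = rest.getD (pos (rest.length + 1)) 0 := by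
          rw [List.getD_eq_getElem?_getD, List.getElem?_append_left hql,
            ← List.getD_eq_getElem?_getD]
        have h2 : (a :: b :: rest).getD (pos (rest.length + 1) + 2) 0
            = rest.getD (pos (rest.length + 1)) 0 := by
          simp [List.getD]
        rw [h1, h2]

lemma rot_eq_pos (l : List Int) (hne : l ≠ []) :
    rot l = [l.getD (pos l.length) 0] :=
  rot_eq_pos_fuel l.length l (le_refl _) hne

-- closed form for the surviving index
lemma pos_closed : ∀ (m e : Nat), 2 ^ e ≤ m → m < 2 ^ (e + 1) →
    pos m = if m = 2 ^ e then m - 1 else 2 * (m - 2 ^ e) - 1 := by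
  intro m
  induction m using Nat.strong_induction_on with
  | _ m ih =>
  intro e h1 h2
  by_cases hp : m = 2 ^ e
  · subst hp
    rw [if_pos rfl]
    match e with
    | 0 => simp [pos]
    | 1 => simp [pos]
    | (e' + 2) =>
      have ha : 1 ≤ 2 ^ e' := Nat.one_le_two_pow
      have hb : 2 ^ (e' + 1) = 2 * 2 ^ e' := by ring
      have hcp : 2 ^ (e' + 2) = 2 * 2 ^ (e' + 1) := by ring
      have ihp := ih (2 ^ (e' + 2) - 1) (by omega) (e' + 1) (by omega) (by omega)
      rw [if_neg (by omega)] at ihp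
      obtain ⟨k, hk⟩ : ∃ k, 2 ^ (e' + 2) = k + 2 := ⟨2 ^ (e' + 2) - 2, by omega⟩
      rw [hk, pos]
      have hprev : pos (k + 1) = 2 * (2 ^ (e' + 2) - 1 - 2 ^ (e' + 1)) - 1 := by
        rw [show k + 1 = 2 ^ (e' + 2) - 1 from by omega]; exact ihp
      rw [if_neg (by omega), hprev]
      omega
  · rw [if_neg hp]
    have ha : 1 ≤ 2 ^ e := Nat.one_le_two_pow
    have hb : 2 ^ (e + 1) = 2 * 2 ^ e := by ring
    obtain ⟨k, hk⟩ : ∃ k, m = k + 2 := ⟨m - 2, by omega⟩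
    have ihm := ih (m - 1) (by omega) e (by omega) (by omega)
    by_cases hc : m - 1 = 2 ^ e
    · -- previous length is the power: pos (m-1) = m-2, hence pos m = 1 = 2*(m-2^e)-1
      rw [if_pos hc] at ihm
      have hprev : pos (k + 1) = k := by
        rw [show k + 1 = m - 1 from by omega]; omega
      rw [hk, pos, if_pos hprev]
      omega
    · rw [if_neg hc] at ihm
      have hprev : pos (k + 1) = 2 * (m - 1 - 2 ^ e) - 1 := by
        rw [show k + 1 = m - 1 from by omega]; exact ihm
      -- 2*(m-1-2^e)-1 = m-2 would force m = 2^(e+1)+1, contradicting m < 2^(e+1)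
      rw [hk, pos, if_neg (by omega), hprev]
      omega

-- findPow n p lands on p * 2^k with the bracket p*2^k ≤ n < 2*(p*2^k)
lemma findPow_spec_fuel : ∀ (fuel : Nat) (n p : Int), (n - p).toNat ≤ fuel → 1 ≤ p → p ≤ n →
    ∃ k : Nat, findPow n p = p * 2 ^ k ∧ p * 2 ^ k ≤ n ∧ n < 2 * (p * 2 ^ k) := by
  intro fuel
  induction fuel with
  | zero =>
    intro n p hf hp hpn
    have hpn' : p = n := by omega
    rw [findPow, dif_neg (by omega)]
    exact ⟨0, by ring, by omega, by omega⟩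
  | succ N ih =>
    intro n p hf hp hpn
    rw [findPow]
    by_cases hc : 2 * p ≤ n
    · rw [dif_pos ⟨hp, hc⟩]
      obtain ⟨k, hk1, hk2, hk3⟩ := ih n (2 * p) (by omega) (by omega) hc
      exact ⟨k + 1, by rw [hk1]; ring,
        by rw [show p * 2 ^ (k + 1) = 2 * p * 2 ^ k from by ring]; exact hk2,
        by rw [show 2 * (p * 2 ^ (k + 1)) = 2 * (2 * p * 2 ^ k) from by ring]; exact hk3⟩
    · rw [dif_neg (by omega)]
      exact ⟨0, by ring, by omega, by omega⟩

lemma findPow_spec (n p : Int) (hp : 1 ≤ p) (hpn : p ≤ n) :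
    ∃ k : Nat, findPow n p = p * 2 ^ k ∧ p * 2 ^ k ≤ n ∧ n < 2 * (p * 2 ^ k) :=
  findPow_spec_fuel (n - p).toNat n p (le_refl _) hp hpn

-- ===== VERDICT (by name: the statement is the Claim_ definition above) =====
theorem solution_spec : Claim_equal_solution := by
  unfold Claim_equal_solution
  intro n _ hn
  have hn1 : 1 ≤ n := hn
  clear hn
  unfold Spec_solution
  set m : Nat := n.toNat with hm
  have hnm : (m : Int) = n := by omega
  have hm1 : 1 ≤ m := by omega
  have hlist := rot_eq_pos (PySem.List.pyRange 1 (n + 1) 1)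
    (by
      have := PySem.List.length_pyRange_one 1 (n + 1)
      intro h
      rw [h] at this
      simp at this
      omega)
  have hlen : (PySem.List.pyRange 1 (n + 1) 1).length = m := by
    rw [PySem.List.length_pyRange_one]; omega
  obtain ⟨k, hk1, hk2, hk3⟩ := findPow_spec n 1 (by omega) hn1
  simp only [one_mul] at hk1 hk2 hk3
  -- name the power of two P so that omega can reason about it
  obtain ⟨P, hP⟩ : ∃ P : Nat, 2 ^ k = P := ⟨_, rfl⟩
  have hPQ : ((P : Nat) : Int) = (2 : Int) ^ k := by rw [← hP]; push_cast; ring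
  rw [← hPQ] at hk1 hk2 hk3
  have h2P : 2 ^ (k + 1) = 2 * P := by rw [pow_succ, hP]; ring
  have hP1 : 1 ≤ P := by rw [← hP]; exact Nat.one_le_two_pow
  have hk2' : 2 ^ k ≤ m := by rw [hP]; omega
  have hk3' : m < 2 ^ (k + 1) := by rw [h2P]; omega
  have hpos := pos_closed m k hk2' hk3'
  rw [hP] at hpos
  have hposlt : pos m < m := pos_lt m hm1
  -- the survivor's value: index i in [1..n] holds i+1
  have hget : (PySem.List.pyRange 1 (n + 1) 1).getD (pos m) 0 = (pos m : Int) + 1 := by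
    rw [List.getD_eq_getElem?_getD]
    have : (PySem.List.pyRange 1 (n + 1) 1)[pos m]? = some (1 + (pos m : Int)) := by
      rw [List.getElem?_eq_getElem (by omega)]
      rw [PySem.List.getElem_pyRange_one]
    rw [this]; simp; ring
  rw [show solution n = (loopA (PySem.List.pyRange 1 (n + 1) 1) []).headD 0 from rfl,
    loopA_eq_rot, hlist, hlen, hget]
  show (pos m : Int) + 1 = solution_alt n
  rw [show solution_alt n = (if findPow n 1 = n then n else 2 * (n - findPow n 1)) from rfl, hk1]
  by_cases hpw : m = P
  · rw [hpos, if_pos hpw, if_pos (by omega)]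
    omega
  · rw [hpos, if_neg hpw, if_neg (by omega)]
    omega
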